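-- pv_equiv track=rewrite | github.com/nwankwolinus/ai-assistant-with-moderation | app.py | moderate_output
-- ===== SOURCE A (Python) =====
-- from typing import List, Dict, Tuple, Optional
--
-- BANNED_KEYWORDS = ["kill", "bomb", "hack", "terror", "attack", "suicide", "murder", "violence", "harm", "dangerous"]
--
-- def moderate_output(response: str) -> Tuple[str, bool]:
--     """Redact unsafe words in the AI output."""
--     moderated = response
--     violated = False
--     for word in BANNED_KEYWORDS:
--         if word in moderated.lower():
--             violated = True
--             moderated = moderated.replace(word, "[REDACTED]")
--             moderated = moderated.replace(word.capitalize(), "[REDACTED]")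
--     return moderated, violated
-- ===== SOURCE B (Python) =====
-- BANNED_KEYWORDS = ["kill", "bomb", "hack", "terror", "attack", "suicide", "murder", "violence", "harm", "dangerous"]
--
-- def _redact(s, pat):
--     """Rewrite every occurrence of pat to [REDACTED] by repeatedly splitting at the first hit."""
--     out = ""
--     i = s.find(pat)
--     while i != -1:
--         out += s[:i] + "[REDACTED]"
--         s = s[i + len(pat):]
--         i = s.find(pat)
--     return out + s
--
-- def _apply(pats, s):
--     """Apply the redactions for each pattern in turn, by recursion on the pattern list."""
--     if not pats:
--         return s
--     return _apply(pats[1:], _redact(s, pats[0]))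
--
-- def moderate_output(response):
--     """Redact unsafe words in the AI output."""
--     low = response.lower()
--     violated = any(w in low for w in BANNED_KEYWORDS)
--     pats = [p for w in BANNED_KEYWORDS for p in (w, w.capitalize())]
--     return _apply(pats, response), violated
-- ===== Notes on version B (the rewrite author's own statement) =====
-- stated objective: alternative
-- what changed: B separates detection (a single any() over the lowered original) from redaction, and replaces A's built-in str.replace calls inside a flag-carrying conditional loop with a hand-written splitter that walks the string via find and slice surgery, driven by structural recursion over the flattened list of 20 case-variant patterns instead of A's per-keyword guarded loop.
import Mathlib
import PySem

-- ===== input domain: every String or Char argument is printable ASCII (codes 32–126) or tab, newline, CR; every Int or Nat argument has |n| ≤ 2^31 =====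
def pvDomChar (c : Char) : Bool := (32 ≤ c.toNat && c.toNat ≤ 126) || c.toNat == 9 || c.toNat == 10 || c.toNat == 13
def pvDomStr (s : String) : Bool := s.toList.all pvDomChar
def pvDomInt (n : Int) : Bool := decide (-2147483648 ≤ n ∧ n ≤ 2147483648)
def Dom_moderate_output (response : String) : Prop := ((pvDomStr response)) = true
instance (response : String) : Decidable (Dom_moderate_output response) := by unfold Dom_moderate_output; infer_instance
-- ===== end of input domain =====

-- B is an alternative decomposition: detection is one any() over the lowered original, and
-- redaction is a hand-written first-occurrence splitter (find + slice surgery in a loop) applied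
-- by structural recursion over the flattened 20-pattern list, instead of A's flag-carrying
-- conditional loop of built-in replaces.

-- ===== PORT A =====
def bannedKeywords : List String :=
  ["kill", "bomb", "hack", "terror", "attack", "suicide", "murder", "violence", "harm", "dangerous"]

-- hand port of str.capitalize() (PySem has none): first char upper-cased, rest lower-cased; exact on ASCII
def pyCapitalize (s : String) : String :=
  match s.toList with
  | [] => ""
  | c :: t => String.ofList (PySem.Chars.upperChar c :: PySem.Chars.lower t)

def moderate_output (response : String) : String × Bool :=
  bannedKeywords.foldl
    (fun st word =>
      if PySem.Str.isIn word (PySem.Str.lower st.1) = true then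
        (PySem.Str.replace (PySem.Str.replace st.1 word "[REDACTED]") (pyCapitalize word) "[REDACTED]",
         true)
      else st)
    (response, false)

-- ===== PORT B =====
def bannedPatterns : List String :=
  bannedKeywords.flatMap (fun w => [w, pyCapitalize w])

-- port of Source B's `_redact` while-loop; fuel only makes the loop total (s.length+1 always
-- suffices because every pattern is nonempty).  s[:i] / s[i+len(pat):] are the nonnegative
-- slices List.take / List.drop (exact here since i = s.find(pat) ≥ 0 in this branch).
def redactGo (fuel : Nat) (out s pat : String) : String :=
  match fuel with
  | 0 => out ++ s
  | f + 1 =>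
    let i := PySem.Str.find s pat
    if i = -1 then out ++ s
    else
      redactGo f (out ++ String.ofList (s.toList.take i.toNat) ++ "[REDACTED]")
        (String.ofList (s.toList.drop (i.toNat + pat.toList.length))) pat

def redact (s pat : String) : String := redactGo (s.toList.length + 1) "" s pat

-- port of Source B's `_apply`: structural recursion on the pattern list
def applyPats : List String → String → String
  | [], s => s
  | p :: rest, s => applyPats rest (redact s p)

def moderate_output_alt (response : String) : String × Bool :=
  (applyPats bannedPatterns response,
   bannedKeywords.any (fun w => PySem.Str.isIn w (PySem.Str.lower response)))

-- ===== PRECONDITION & SPEC =====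
def Spec_moderate_output (response : String) (out : String × Bool) : Prop := out = moderate_output_alt response
instance (response : String) (out : String × Bool) : Decidable (Spec_moderate_output response out) := by unfold Spec_moderate_output; infer_instance

-- ===== CLAIM (what is proved, stated in full; the proofs are below) =====
def Claim_equal_moderate_output : Prop := ∀ (response : String), Dom_moderate_output response → Spec_moderate_output response (moderate_output response)

-- ===== LEMMAS AND PROOFS =====

-- replace of a non-occurring, nonempty pattern is the identity
theorem replace_go_id (old new : List Char) (l acc : List Char) (fuel : Nat)
    (hni : ¬ old <:+: l) :
    PySem.Chars.replace.go old new fuel l acc = acc.reverse ++ l := by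
  induction l generalizing fuel acc with
  | nil =>
    cases fuel <;> simp [PySem.Chars.replace.go]
  | cons c t ih =>
    cases fuel with
    | zero => simp [PySem.Chars.replace.go]
    | succ f =>
      have hpre : old.isPrefixOf (c :: t) = false := by
        rw [Bool.eq_false_iff]
        intro hb
        exact hni (List.isPrefixOf_iff_prefix.mp hb).isInfix
      have hni' : ¬ old <:+: t := fun h => hni (h.trans (List.suffix_cons c t).isInfix)
      simp [PySem.Chars.replace.go, hpre, ih _ _ hni']

theorem chars_replace_id (s old new : List Char) (hne : old ≠ []) (hni : ¬ old <:+: s) :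
    PySem.Chars.replace s old new = s := by
  rw [PySem.Chars.replace, if_neg (by simpa using hne)]
  simpa using replace_go_id old new s [] s.length hni

theorem str_replace_id (s old new : String) (hne : old.toList ≠ [])
    (hni : ¬ old.toList <:+: s.toList) : PySem.Str.replace s old new = s := by
  apply String.toList_inj.mp
  rw [PySem.Str.toList_replace]
  exact chars_replace_id _ _ _ hne hni

-- a pattern whose lower form occurs nowhere in lower s occurs nowhere in s itself
theorem not_infix_of_lower_eq (p s wl : List Char) (hw : PySem.Chars.lower p = wl)
    (hni : ¬ wl <:+: PySem.Chars.lower s) : ¬ p <:+: s := by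
  intro h
  exact hni (hw ▸ (List.IsInfix.map PySem.Chars.lowerChar h))

-- the properties of each banned keyword that the equivalence uses
def GoodWord (w : String) : Prop :=
  w.toList ≠ [] ∧ (pyCapitalize w).toList ≠ [] ∧
  PySem.Chars.lower w.toList = w.toList ∧
  PySem.Chars.lower (pyCapitalize w).toList = w.toList

theorem allGood : ∀ w ∈ bannedKeywords, GoodWord w := by
  intro w hw
  unfold GoodWord
  fin_cases hw <;> exact ⟨by decide, by decide, by decide, by decide⟩

-- the two-replace body of A is the identity when the keyword is not in lower s
theorem rep2_id (s w : String) (hg : GoodWord w)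
    (ht : ¬ PySem.Str.isIn w (PySem.Str.lower s) = true) :
    PySem.Str.replace (PySem.Str.replace s w "[REDACTED]") (pyCapitalize w) "[REDACTED]" = s := by
  obtain ⟨h1, h2, h3, h4⟩ := hg
  have hni : ¬ w.toList <:+: PySem.Chars.lower s.toList := by
    rw [PySem.Str.isIn_iff_infix] at ht
    simpa [PySem.Str.toList_lower] using ht
  have e1 : PySem.Str.replace s w "[REDACTED]" = s :=
    str_replace_id _ _ _ h1 (not_infix_of_lower_eq _ _ _ h3 hni)
  rw [e1]
  exact str_replace_id _ _ _ h2 (not_infix_of_lower_eq _ _ _ h4 hni)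

-- abbreviations used only in the proofs
def stepA (st : String × Bool) (word : String) : String × Bool :=
  if PySem.Str.isIn word (PySem.Str.lower st.1) = true then
    (PySem.Str.replace (PySem.Str.replace st.1 word "[REDACTED]") (pyCapitalize word) "[REDACTED]",
     true)
  else st

def repl (m pat : String) : String := PySem.Str.replace m pat "[REDACTED]"

theorem stepA_of_pos (s : String) (v : Bool) (w : String)
    (h : PySem.Str.isIn w (PySem.Str.lower s) = true) :
    stepA (s, v) w =
      (PySem.Str.replace (PySem.Str.replace s w "[REDACTED]") (pyCapitalize w) "[REDACTED]", true) := by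
  unfold stepA
  rw [if_pos h]

theorem stepA_of_neg (s : String) (v : Bool) (w : String)
    (h : ¬ PySem.Str.isIn w (PySem.Str.lower s) = true) :
    stepA (s, v) w = (s, v) := by
  unfold stepA
  rw [if_neg h]

-- once the flag is true it stays true
theorem snd_true (ws : List String) (s : String) :
    (ws.foldl stepA (s, true)).2 = true := by
  induction ws generalizing s with
  | nil => rfl
  | cons w rest ih =>
    rw [List.foldl_cons]
    by_cases h : PySem.Str.isIn w (PySem.Str.lower s) = true
    · rw [stepA_of_pos s true w h]; exact ih _
    · rw [stepA_of_neg s true w h]; exact ih s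

-- A's flag equals any() over the ORIGINAL string: until the first hit nothing is replaced
theorem snd_eq_any (ws : List String) (hg : ∀ w ∈ ws, GoodWord w) (s : String) :
    (ws.foldl stepA (s, false)).2 = ws.any (fun w => PySem.Str.isIn w (PySem.Str.lower s)) := by
  induction ws generalizing s with
  | nil => rfl
  | cons w rest ih =>
    have hgr : ∀ u ∈ rest, GoodWord u := fun u hu => hg u (List.mem_cons_of_mem _ hu)
    rw [List.foldl_cons, List.any_cons]
    by_cases h : PySem.Str.isIn w (PySem.Str.lower s) = true
    · rw [stepA_of_pos s false w h, snd_true, h, Bool.true_or]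
    · rw [stepA_of_neg s false w h, ih hgr s, Bool.not_eq_true] at *
      rw [h, Bool.false_or]

-- A's moderated string equals the unconditional sequence of replaces over the flattened pattern list
theorem fst_eq_fold (ws : List String) (hg : ∀ w ∈ ws, GoodWord w) (s : String) (v : Bool) :
    (ws.foldl stepA (s, v)).1 =
      (ws.flatMap (fun w => [w, pyCapitalize w])).foldl repl s := by
  induction ws generalizing s v with
  | nil => rfl
  | cons w rest ih =>
    have hgw : GoodWord w := hg w List.mem_cons_self
    have hgr : ∀ u ∈ rest, GoodWord u := fun u hu => hg u (List.mem_cons_of_mem _ hu)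
    rw [List.foldl_cons, List.flatMap_cons, List.foldl_append]
    simp only [List.foldl_cons, List.foldl_nil, repl]
    by_cases h : PySem.Str.isIn w (PySem.Str.lower s) = true
    · rw [stepA_of_pos s v w h]
      exact ih hgr _ true
    · rw [stepA_of_neg s v w h, rep2_id s w hgw h]
      exact ih hgr s v

-- ============ B side: the splitter loop computes str.replace ============

-- replace.go is accumulator-passing: peel the accumulator off
theorem go_acc (old new : List Char) (fuel : Nat) (l acc : List Char) :
    PySem.Chars.replace.go old new fuel l acc =
      acc.reverse ++ PySem.Chars.replace.go old new fuel l [] := by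
  induction fuel generalizing l acc with
  | zero => simp [PySem.Chars.replace.go]
  | succ f ih =>
    cases l with
    | nil => simp [PySem.Chars.replace.go]
    | cons c t =>
      by_cases hp : old.isPrefixOf (c :: t) = true
      · simp only [PySem.Chars.replace.go, hp, if_true]
        rw [ih _ (new.reverse ++ acc), ih _ (new.reverse ++ [])]
        simp
      · simp only [PySem.Chars.replace.go, hp]
        rw [ih t (c :: acc), ih t [c]]
        simp

-- one unit of surplus fuel is irrelevant once fuel covers the remaining length
theorem go_fuel_succ (old new : List Char) (hold : old ≠ []) (f : Nat) :
    ∀ l acc : List Char, l.length ≤ f →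
      PySem.Chars.replace.go old new (f + 1) l acc =
        PySem.Chars.replace.go old new f l acc := by
  induction f with
  | zero =>
    intro l acc hl
    have : l = [] := List.eq_nil_of_length_eq_zero (Nat.le_zero.mp hl)
    subst this
    simp [PySem.Chars.replace.go]
  | succ f ih =>
    intro l acc hl
    cases l with
    | nil => simp [PySem.Chars.replace.go]
    | cons c t =>
      by_cases hp : old.isPrefixOf (c :: t) = true
      · simp only [PySem.Chars.replace.go, hp, if_true]
        apply ih
        have h1 : 1 ≤ old.length := List.length_pos_iff.mpr hold
        simp only [List.length_drop, List.length_cons]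
        simp only [List.length_cons] at hl
        omega
      · simp only [PySem.Chars.replace.go, hp]
        apply ih
        simp only [List.length_cons] at hl
        omega

theorem go_fuel_ge (old new : List Char) (hold : old ≠ []) :
    ∀ fuel (l acc : List Char), l.length ≤ fuel →
      PySem.Chars.replace.go old new fuel l acc =
        PySem.Chars.replace.go old new l.length l acc := by
  intro fuel
  induction fuel with
  | zero =>
    intro l acc hl
    have : l = [] := List.eq_nil_of_length_eq_zero (Nat.le_zero.mp hl)
    subst this; rfl
  | succ f ih =>
    intro l acc hl
    rcases Nat.lt_or_ge l.length (f + 1) with h | h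
    · rw [go_fuel_succ old new hold f l acc (by omega)]
      exact ih l acc (by omega)
    · have : l.length = f + 1 := by omega
      rw [this]

-- advancing past the i characters before the first match
theorem go_advance (old new : List Char) (hold : old ≠ []) :
    ∀ (i : Nat) (l acc : List Char) (fuel : Nat), i + 1 ≤ fuel →
      (∀ j < i, ¬ old.isPrefixOf (l.drop j) = true) →
      old.isPrefixOf (l.drop i) = true →
      PySem.Chars.replace.go old new fuel l acc =
        PySem.Chars.replace.go old new (fuel - (i + 1)) (l.drop (i + old.length))
          (new.reverse ++ (l.take i).reverse ++ acc) := by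
  intro i
  induction i with
  | zero =>
    intro l acc fuel hf _ hp
    obtain ⟨f, rfl⟩ := Nat.exists_eq_add_of_le hf
    cases l with
    | nil =>
      exfalso
      simp only [List.drop_nil] at hp
      exact hold (List.prefix_nil.mp (by simpa using List.isPrefixOf_iff_prefix.mp hp))
    | cons c t =>
      simp only [List.drop_zero] at hp
      simp [PySem.Chars.replace.go, hp, Nat.add_comm]
  | succ i ih =>
    intro l acc fuel hf hj hp
    cases l with
    | nil =>
      exfalso
      simp only [List.drop_nil] at hp
      exact hold (List.prefix_nil.mp (by simpa using List.isPrefixOf_iff_prefix.mp hp))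
    | cons c t =>
      obtain ⟨f, rfl⟩ := Nat.exists_eq_add_of_le (show 1 ≤ fuel by omega)
      have h0 : ¬ old.isPrefixOf ((c :: t).drop 0) = true := hj 0 (by omega)
      simp only [List.drop_zero] at h0
      have hstep : PySem.Chars.replace.go old new (1 + f) (c :: t) acc =
          PySem.Chars.replace.go old new f t (c :: acc) := by
        have : 1 + f = f + 1 := Nat.add_comm 1 f
        rw [this]
        simp [PySem.Chars.replace.go, h0]
      rw [hstep]
      have := ih t (c :: acc) f (by omega)
        (fun j hjlt => by simpa using hj (j + 1) (by omega))
        (by simpa using hp)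
      rw [this]
      have e1 : t.drop (i + old.length) = (c :: t).drop (i + 1 + old.length) := by
        simp [Nat.add_right_comm]
      have e2 : new.reverse ++ (t.take i).reverse ++ (c :: acc) =
          new.reverse ++ ((c :: t).take (i + 1)).reverse ++ acc := by
        simp
      have e3 : f - (i + 1) = 1 + f - (i + 1 + 1) := by omega
      rw [e1, e2, e3]

-- first-occurrence characterization of replace (nonempty pattern)
theorem replace_split (l old new : List Char) (hold : old ≠ []) (hin : old <:+: l) :
    PySem.Chars.replace l old new =
      l.take (PySem.Chars.find l old).toNat ++ new ++
        PySem.Chars.replace (l.drop ((PySem.Chars.find l old).toNat + old.length)) old new := by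
  have hfind : 0 ≤ PySem.Chars.find l old := by
    have hne := (PySem.Chars.find_eq_neg_one_iff l old).not.mpr (by simpa using hin)
    have := PySem.Chars.neg_one_le_find l old
    omega
  obtain ⟨hpre, hmin⟩ := PySem.Chars.find_spec hfind
  set i := (PySem.Chars.find l old).toNat with hi
  have hplen : 1 ≤ old.length := List.length_pos_iff.mpr hold
  have hile : i + old.length ≤ l.length := by
    have := hpre.length_le
    simp only [List.length_drop] at this
    have hi_le : i ≤ l.length := by
      by_contra hgt
      rw [not_le] at hgt
      simp [List.drop_eq_nil_of_le (le_of_lt hgt)] at hpre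
      exact hold hpre
    omega
  have hfuel : i + 1 ≤ l.length := by omega
  rw [PySem.Chars.replace, if_neg (by simpa using hold)]
  rw [go_advance old new hold i l [] l.length hfuel
      (fun j hj => by
        rw [Bool.not_eq_true, Bool.eq_false_iff]
        intro hb
        exact hmin j hj (List.isPrefixOf_iff_prefix.mp hb))
      (List.isPrefixOf_iff_prefix.mpr hpre)]
  have hlen2 : (l.drop (i + old.length)).length ≤ l.length - (i + 1) := by
    simp only [List.length_drop]
    omega
  rw [go_fuel_ge old new hold _ _ _ hlen2, go_acc]
  rw [PySem.Chars.replace, if_neg (by simpa using hold)]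
  simp [List.append_assoc]

-- the fueled splitter loop computes replace, with any sufficient fuel
theorem redactGo_eq (pat : String) (hp : pat.toList ≠ []) :
    ∀ (n : Nat) (s out : String) (fuel : Nat), s.toList.length ≤ n → s.toList.length < fuel →
      redactGo fuel out s pat = out ++ PySem.Str.replace s pat "[REDACTED]" := by
  intro n
  induction n with
  | zero =>
    intro s out fuel hn hfuel
    have hsl : s.toList = [] := List.eq_nil_of_length_eq_zero (Nat.le_zero.mp hn)
    obtain ⟨f, rfl⟩ : ∃ f, fuel = f + 1 := ⟨fuel - 1, by omega⟩
    have hfind : PySem.Str.find s pat = -1 := by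
      rw [PySem.Str.find, PySem.Chars.find_eq_neg_one_iff, hsl]
      intro h
      exact hp (List.infix_nil.mp h)
    have hrep : PySem.Str.replace s pat "[REDACTED]" = s :=
      str_replace_id s pat _ hp (by rw [hsl]; intro h; exact hp (List.infix_nil.mp h))
    simp [redactGo, hrep]
    intro hco
    exact absurd (by simpa [PySem.Str.find] using hfind) hco
  | succ n ih =>
    intro s out fuel hn hfuel
    obtain ⟨f, rfl⟩ : ∃ f, fuel = f + 1 := ⟨fuel - 1, by omega⟩
    by_cases hfind : PySem.Str.find s pat = -1
    · have hni : ¬ pat.toList <:+: s.toList := by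
        rwa [PySem.Str.find, PySem.Chars.find_eq_neg_one_iff] at hfind
      have hrep : PySem.Str.replace s pat "[REDACTED]" = s := str_replace_id s pat _ hp hni
      simp [redactGo, hrep]
      intro hco
      exact absurd (by simpa [PySem.Str.find] using hfind) hco
    · have hin : pat.toList <:+: s.toList := by
        rw [PySem.Str.find, PySem.Chars.find_eq_neg_one_iff] at hfind
        exact not_not.mp hfind
      have hge : 0 ≤ PySem.Str.find s pat := by
        have := PySem.Chars.neg_one_le_find s.toList pat.toList
        rw [PySem.Str.find] at hfind ⊢
        omega
      simp only [redactGo, hfind, if_false]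
      set i := (PySem.Str.find s pat).toNat with hidef
      have hieq : i = (PySem.Chars.find s.toList pat.toList).toNat := by
        rw [hidef, PySem.Str.find]
      have hplen : 1 ≤ pat.toList.length := List.length_pos_iff.mpr hp
      have hlen0 : s.toList.length ≠ 0 := by
        intro h0
        have hsl := List.eq_nil_of_length_eq_zero h0
        rw [hsl] at hin
        exact hp (List.infix_nil.mp hin)
      have hlens : (String.ofList (s.toList.drop (i + pat.toList.length))).toList.length
          ≤ s.toList.length - 1 := by
        simp only [String.toList_ofList, List.length_drop]
        omega
      rw [ih (String.ofList (s.toList.drop (i + pat.toList.length)))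
        (out ++ String.ofList (s.toList.take i) ++ "[REDACTED]") f
        (by omega) (by omega)]
      apply String.toList_inj.mp
      simp only [String.toList_append, String.toList_ofList, PySem.Str.toList_replace]
      rw [hieq]
      rw [replace_split s.toList pat.toList _ hp hin]
      simp [List.append_assoc]

theorem redact_eq (s pat : String) (hp : pat.toList ≠ []) :
    redact s pat = PySem.Str.replace s pat "[REDACTED]" := by
  rw [redact, redactGo_eq pat hp s.toList.length s "" (s.toList.length + 1) le_rfl (by omega)]
  simp

theorem applyPats_eq (pats : List String) (hps : ∀ p ∈ pats, p.toList ≠ []) (s : String) :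
    applyPats pats s = pats.foldl repl s := by
  induction pats generalizing s with
  | nil => rfl
  | cons p rest ih =>
    rw [applyPats, List.foldl_cons,
      redact_eq s p (hps p List.mem_cons_self)]
    exact ih (fun q hq => hps q (List.mem_cons_of_mem _ hq)) _

theorem patterns_ne : ∀ p ∈ bannedPatterns, p.toList ≠ [] := by
  intro p hp
  rw [bannedPatterns, List.mem_flatMap] at hp
  obtain ⟨w, hw, hpw⟩ := hp
  obtain ⟨h1, h2, -, -⟩ := allGood w hw
  simp only [List.mem_cons] at hpw
  rcases hpw with rfl | rfl | h
  · exact h1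
  · exact h2
  · exact absurd h (List.not_mem_nil)

-- ===== VERDICT (by name: the statement is the Claim_ definition above) =====
theorem moderate_output_spec : Claim_equal_moderate_output := by
  intro response _
  unfold Spec_moderate_output moderate_output moderate_output_alt
  have hfold : bannedKeywords.foldl
      (fun st word =>
        if PySem.Str.isIn word (PySem.Str.lower st.1) = true then
          (PySem.Str.replace (PySem.Str.replace st.1 word "[REDACTED]") (pyCapitalize word) "[REDACTED]",
           true)
        else st) (response, false) = bannedKeywords.foldl stepA (response, false) := rfl
  rw [hfold]
  refine Prod.ext ?_ ?_
  · rw [fst_eq_fold bannedKeywords allGood response false,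
      applyPats_eq bannedPatterns patterns_ne response]
    rfl
  · exact snd_eq_any bannedKeywords allGood response
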